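-- pv_equiv track=rewrite | github.com/kdeldycke/workflows | repomatic/renovate.py | diff_lock_versions
-- ===== SOURCE A (Python) =====
-- def diff_lock_versions(
--     before: dict[str, str],
--     after: dict[str, str],
-- ) -> list[tuple[str, str, str]]:
--     """Compare two version mappings and return the list of changes.
--
--     :param before: Package versions before the upgrade.
--     :param after: Package versions after the upgrade.
--     :return: A sorted list of ``(name, old_version, new_version)`` tuples.
--         ``old_version`` is empty for added packages; ``new_version`` is empty
--         for removed packages.
--     """
--     changes = []
--     for name in sorted(set(before) | set(after)):
--         old = before.get(name, "")
--         new = after.get(name, "")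
--         if old != new:
--             changes.append((name, old, new))
--     return changes
-- ===== SOURCE B (Python) =====
-- def diff_lock_versions(
--     before: dict[str, str],
--     after: dict[str, str],
-- ) -> list[tuple[str, str, str]]:
--     """Collect changes unsorted in one pass over each dict, then sort by name."""
--     changes = []
--     for name, new in after.items():
--         old = before.get(name, "")
--         if old != new:
--             changes.append((name, old, new))
--     for name, old in before.items():
--         if name not in after and old != "":
--             changes.append((name, old, ""))
--     changes.sort(key=lambda c: c[0])
--     return changes
-- ===== Notes on version B (the rewrite author's own statement) =====
-- stated objective: alternative
-- what changed: Instead of building and sorting the union of key sets and probing both dicts for every name, B collects changed entries unsorted by one pass over after.items() (value changed or added) and one pass over before.items() (removed, non-empty, not in after), then sorts the collected list by name once at the end.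
import Mathlib
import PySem

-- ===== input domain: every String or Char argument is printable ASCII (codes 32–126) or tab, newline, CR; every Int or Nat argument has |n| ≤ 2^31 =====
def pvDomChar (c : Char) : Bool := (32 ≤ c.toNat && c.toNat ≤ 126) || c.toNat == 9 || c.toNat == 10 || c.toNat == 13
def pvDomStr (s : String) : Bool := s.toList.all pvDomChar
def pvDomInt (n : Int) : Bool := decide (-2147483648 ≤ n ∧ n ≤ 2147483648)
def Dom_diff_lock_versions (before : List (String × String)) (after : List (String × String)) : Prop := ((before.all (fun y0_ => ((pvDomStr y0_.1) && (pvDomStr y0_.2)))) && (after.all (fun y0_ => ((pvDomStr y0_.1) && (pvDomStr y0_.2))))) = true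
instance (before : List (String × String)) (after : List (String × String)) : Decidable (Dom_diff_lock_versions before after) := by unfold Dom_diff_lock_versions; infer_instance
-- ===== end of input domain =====

-- B collects the changed entries unsorted (one pass over after's items, one over before's) and sorts once
-- at the end by name, instead of A's probing both dicts for every name of the pre-sorted key-set union.


-- ===== PORT A =====
def diff_lock_versions (before : List (String × String)) (after : List (String × String)) : List (String × String × String) :=
  let bd : PySem.Dict String String := PySem.Dict.mk before
  let ad : PySem.Dict String String := PySem.Dict.mk after
  let names := PySem.List.sorted (PySem.Set.union (PySem.Set.ofList bd.keys) (PySem.Set.ofList ad.keys)) (fun x => x)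
  names.foldl (fun changes name =>
    let old := bd.getD name ""
    let new := ad.getD name ""
    if old ≠ new then changes ++ [(name, old, new)] else changes) []

-- ===== PORT B =====
def diff_lock_versions_alt (before : List (String × String)) (after : List (String × String)) : List (String × String × String) :=
  let changes1 := after.foldl (fun changes p =>
      let old := (PySem.Dict.mk before).getD p.1 ""
      if old ≠ p.2 then changes ++ [(p.1, old, p.2)] else changes) []
  let changes2 := before.foldl (fun changes p =>
      if (PySem.Dict.mk after).contains p.1 = false ∧ p.2 ≠ "" then changes ++ [(p.1, p.2, "")] else changes) changes1
  PySem.List.sorted changes2 (fun c => c.1)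

-- ===== PRECONDITION & SPEC =====
-- Pre_ excludes association lists with a duplicate key: under the type convention a dict is an
-- association list with unique keys, and a duplicate-key list does not represent any Python dict input.
def Pre_diff_lock_versions (before : List (String × String)) (after : List (String × String)) : Prop :=
  (before.map Prod.fst).Nodup ∧ (after.map Prod.fst).Nodup
instance (before : List (String × String)) (after : List (String × String)) : Decidable (Pre_diff_lock_versions before after) := by unfold Pre_diff_lock_versions; infer_instance

def pvWitness_diff_lock_versions : (List (String × String)) × (List (String × String)) :=
  ([("pkg", "1.0"), ("gone", "2.0")], [("pkg", "1.1"), ("new", "3.0")])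

def Spec_diff_lock_versions (before : List (String × String)) (after : List (String × String)) (out : List (String × String × String)) : Prop := out = diff_lock_versions_alt before after
instance (before : List (String × String)) (after : List (String × String)) (out : List (String × String × String)) : Decidable (Spec_diff_lock_versions before after out) := by unfold Spec_diff_lock_versions; infer_instance

-- ===== CLAIM (what is proved, stated in full; the proofs are below) =====
def Claim_equal_diff_lock_versions : Prop := ∀ (before : List (String × String)) (after : List (String × String)), Dom_diff_lock_versions before after → Pre_diff_lock_versions before after → Spec_diff_lock_versions before after (diff_lock_versions before after)

-- ===== LEMMAS AND PROOFS =====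

theorem diff_lock_versions_eq (before after : List (String × String))
    (hb : (before.map Prod.fst).Nodup) (ha : (after.map Prod.fst).Nodup) :
    diff_lock_versions before after = diff_lock_versions_alt before after := by
  unfold diff_lock_versions diff_lock_versions_alt
  simp only []
  set bd : PySem.Dict String String := PySem.Dict.mk before with hbd
  set ad : PySem.Dict String String := PySem.Dict.mk after with had
  have hbk : bd.keys.Nodup := by simpa [hbd, PySem.Dict.keys_mk] using hb
  have hak : ad.keys.Nodup := by simpa [had, PySem.Dict.keys_mk] using ha
  set names := PySem.List.sorted (PySem.Set.union (PySem.Set.ofList bd.keys) (PySem.Set.ofList ad.keys)) (fun x => x) with hnames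
  -- rewrite the three folds as filter+map
  have hA := PySem.List.foldl_append_if
      (fun name => decide (bd.getD name "" ≠ ad.getD name ""))
      (fun name => (name, bd.getD name "", ad.getD name "")) names []
  have h1 := PySem.List.foldl_append_if
      (fun p : String × String => decide (bd.getD p.1 "" ≠ p.2))
      (fun p : String × String => (p.1, bd.getD p.1 "", p.2)) after []
  have h2 := PySem.List.foldl_append_if
      (fun p : String × String => decide (ad.contains p.1 = false ∧ p.2 ≠ ""))
      (fun p : String × String => (p.1, p.2, "")) before
      (List.map (fun p : String × String => (p.1, bd.getD p.1 "", p.2))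
        (List.filter (fun p : String × String => decide (bd.getD p.1 "" ≠ p.2)) after))
  simp only [decide_eq_true_eq, List.nil_append] at hA h1 h2
  rw [hA, h1, h2]
  -- target: map fA (filter pA names) = sorted (c1 ++ c2) (·.1)
  -- abbreviations
  set pA := fun name => decide (bd.getD name "" ≠ ad.getD name "") with hpA
  -- key facts
  have hkb : bd.keys = before.map Prod.fst := PySem.Dict.keys_mk before
  have hka : ad.keys = after.map Prod.fst := PySem.Dict.keys_mk after
  have hgetb : ∀ n v, (n, v) ∈ before → bd.getD n "" = v := fun n v h =>
    PySem.Dict.getD_of_mem_items bd h hbk ""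
  have hgeta : ∀ n v, (n, v) ∈ after → ad.getD n "" = v := fun n v h =>
    PySem.Dict.getD_of_mem_items ad h hak ""
  have hca : ∀ n, ad.contains n = true ↔ n ∈ after.map Prod.fst := by
    intro n; rw [PySem.Dict.contains_iff_mem_keys, hka]
  have hcb : ∀ n, bd.contains n = true ↔ n ∈ before.map Prod.fst := by
    intro n; rw [PySem.Dict.contains_iff_mem_keys, hkb]
  have hmemnames : ∀ n, n ∈ names ↔ n ∈ before.map Prod.fst ∨ n ∈ after.map Prod.fst := by
    intro n
    rw [hnames, PySem.List.mem_sorted, PySem.Set.mem_union, PySem.Set.mem_ofList,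
      PySem.Set.mem_ofList, hkb, hka]
  -- names is strictly increasing
  have hnodup_union : (PySem.Set.union (PySem.Set.ofList bd.keys) (PySem.Set.ofList ad.keys)).Nodup :=
    PySem.Set.nodup_union _ _ (PySem.Set.nodup_ofList _)
  have hnodup_names : names.Nodup :=
    ((PySem.List.sorted_perm _ _ _).nodup_iff).2 hnodup_union
  have hlt_names : names.Pairwise (· < ·) := by
    have hle : names.Pairwise (· ≤ ·) := PySem.List.sorted_pairwise _ (fun x => x)
    have := hle.and hnodup_names
    exact this.imp (fun h => lt_of_le_of_ne h.1 h.2)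
  -- the A-side list
  have hApw : (List.map (fun name => (name, bd.getD name "", ad.getD name ""))
      (List.filter pA names)).Pairwise (fun a b => a.1 < b.1) := by
    rw [List.pairwise_map]
    exact (hlt_names.sublist List.filter_sublist).imp (fun h => h)
  have hAnodup : (List.map (fun name => (name, bd.getD name "", ad.getD name ""))
      (List.filter pA names)).Nodup :=
    hApw.imp (fun h => by intro he; rw [he] at h; exact lt_irrefl _ h)
  -- the B-side list
  set c1 := List.map (fun p : String × String => (p.1, bd.getD p.1 "", p.2))
      (List.filter (fun p : String × String => decide (bd.getD p.1 "" ≠ p.2)) after) with hc1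
  set c2 := List.map (fun p : String × String => (p.1, p.2, ""))
      (List.filter (fun p : String × String => decide (ad.contains p.1 = false ∧ p.2 ≠ "")) before) with hc2
  have hc1f : c1.map Prod.fst = (List.filter (fun p : String × String => decide (bd.getD p.1 "" ≠ p.2)) after).map Prod.fst := by
    rw [hc1, List.map_map]; rfl
  have hc2f : c2.map Prod.fst = (List.filter (fun p : String × String => decide (ad.contains p.1 = false ∧ p.2 ≠ "")) before).map Prod.fst := by
    rw [hc2, List.map_map]; rfl
  have hc1n : c1.Nodup := by
    apply List.Nodup.of_map Prod.fst
    rw [hc1f]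
    exact ha.sublist (List.filter_sublist.map _)
  have hc2n : c2.Nodup := by
    apply List.Nodup.of_map Prod.fst
    rw [hc2f]
    exact hb.sublist (List.filter_sublist.map _)
  have hdisj : ∀ a ∈ c1, a ∉ c2 := by
    intro a h1m h2m
    rw [hc1, List.mem_map] at h1m
    obtain ⟨p, hp, rfl⟩ := h1m
    rw [List.mem_filter] at hp
    rw [hc2, List.mem_map] at h2m
    obtain ⟨q, hq, hqe⟩ := h2m
    rw [List.mem_filter, decide_eq_true_eq] at hq
    have hq1 : q.1 = p.1 := by
      have := congrArg (fun t : String × String × String => t.1) hqe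
      simpa using this
    have hcontra : ad.contains p.1 = true := (hca p.1).2 (List.mem_map.2 ⟨p, hp.1, rfl⟩)
    rw [← hq1, hq.2.1] at hcontra
    exact Bool.false_ne_true hcontra
  have hBnodup : (c1 ++ c2).Nodup := by
    rw [List.nodup_append]
    refine ⟨hc1n, hc2n, ?_⟩
    intro a h1m b h2m hab
    exact hdisj a h1m (hab ▸ h2m)
  -- membership equivalence
  have hmem : ∀ a, a ∈ List.map (fun name => (name, bd.getD name "", ad.getD name ""))
      (List.filter pA names) ↔ a ∈ c1 ++ c2 := by
    intro a
    constructor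
    · intro hm
      rw [List.mem_map] at hm
      obtain ⟨n, hn, rfl⟩ := hm
      rw [List.mem_filter, hpA, decide_eq_true_eq] at hn
      obtain ⟨hnn, hne⟩ := hn
      by_cases hc : ad.contains n = true
      · obtain ⟨⟨n', v⟩, hp, hpe⟩ := List.mem_map.1 ((hca n).1 hc)
        simp only [] at hpe
        subst hpe
        rw [List.mem_append]; left
        rw [hc1, List.mem_map]
        refine ⟨(n', v), ?_, ?_⟩
        · rw [List.mem_filter, decide_eq_true_eq]
          refine ⟨hp, ?_⟩
          show bd.getD n' "" ≠ v
          rw [hgeta n' v hp] at hne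
          exact hne
        · show (n', bd.getD n' "", v) = (n', bd.getD n' "", ad.getD n' "")
          rw [hgeta n' v hp]
      · have hcf : ad.contains n = false := by simpa using hc
        have hnew : ad.getD n "" = "" := PySem.Dict.getD_of_not_contains ad "" hcf
        have hnb : n ∈ before.map Prod.fst := by
          rcases (hmemnames n).1 hnn with h | h
          · exact h
          · exact absurd ((hca n).2 h) hc
        obtain ⟨⟨n', w⟩, hq, hqe⟩ := List.mem_map.1 hnb
        simp only [] at hqe
        subst hqe
        have hold : bd.getD n' "" = w := hgetb n' w hq
        rw [List.mem_append]; right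
        rw [hc2, List.mem_map]
        refine ⟨(n', w), ?_, ?_⟩
        · rw [List.mem_filter, decide_eq_true_eq]
          refine ⟨hq, hcf, ?_⟩
          show w ≠ ""
          intro hw
          apply hne
          rw [hold, hnew, hw]
        · show (n', w, "") = (n', bd.getD n' "", ad.getD n' "")
          rw [hold, hnew]
    · intro hm
      rw [List.mem_append] at hm
      rcases hm with hm | hm
      · rw [hc1, List.mem_map] at hm
        obtain ⟨p, hp, rfl⟩ := hm
        rw [List.mem_filter, decide_eq_true_eq] at hp
        rw [List.mem_map]
        refine ⟨p.1, ?_, ?_⟩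
        · rw [List.mem_filter, hpA, decide_eq_true_eq]
          refine ⟨(hmemnames p.1).2 (Or.inr (List.mem_map.2 ⟨p, hp.1, rfl⟩)), ?_⟩
          rw [hgeta p.1 p.2 hp.1]
          exact hp.2
        · rw [hgeta p.1 p.2 hp.1]
      · rw [hc2, List.mem_map] at hm
        obtain ⟨q, hq, rfl⟩ := hm
        rw [List.mem_filter, decide_eq_true_eq] at hq
        obtain ⟨hqm, hqc, hqs⟩ := hq
        rw [List.mem_map]
        refine ⟨q.1, ?_, ?_⟩
        · rw [List.mem_filter, hpA, decide_eq_true_eq]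
          refine ⟨(hmemnames q.1).2 (Or.inl (List.mem_map.2 ⟨q, hqm, rfl⟩)), ?_⟩
          rw [hgetb q.1 q.2 hqm, PySem.Dict.getD_of_not_contains ad "" hqc]
          exact hqs
        · rw [hgetb q.1 q.2 hqm, PySem.Dict.getD_of_not_contains ad "" hqc]
  have hperm : (List.map (fun name => (name, bd.getD name "", ad.getD name ""))
      (List.filter pA names)).Perm (c1 ++ c2) :=
    (List.perm_ext_iff_of_nodup hAnodup hBnodup).2 hmem
  exact (PySem.List.sorted_eq_of_perm_of_pairwise_lt _ _ _ hperm hApw).symm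


-- ===== VERDICT (by name: the statement is the Claim_ definition above) =====
theorem diff_lock_versions_spec : Claim_equal_diff_lock_versions := by
  intro before after _ hpre
  exact diff_lock_versions_eq before after hpre.1 hpre.2
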